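-- pv_equiv track=rewrite | github.com/Xiuyi-Wang/Feature_similarity_Project | github_feature_similarity/function_generate_contrast_pairs.py | generate_contrast_pairs_all
-- ===== SOURCE A (Python) =====
-- def generate_contrast_pairs_all (networks):
--     """
--     :param networks: is a list
--     :return:
--     """
--     from itertools import combinations
--
--     # generate combinations 1
--     network_pairs = list(combinations(networks, 2))
--     # generate combinations of combinations 1
--     network_pairs_pairs = list(combinations(network_pairs, 2))
--
--     # remove the combinations that do not have one common element
--     networks_pairs_final = []
--
--     for network_pair in network_pairs_pairs:
--
--         # make sure has one common element in the first part and second part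
--         if network_pair[0][0] in network_pair[1] or network_pair[0][1] in network_pair[1]:
--
--             if network_pair[0][1] in network_pair[1]:
--                 # adjust the order make sure the common element is the first
--                 pair = [network_pair[0][1] , network_pair[0][0] , network_pair[1][0] , network_pair[1][1]]
--
--             else:
--                 pair = list(network_pair[0] + network_pair[1])
--
--             # make sure the third element is equal to first element
--             if pair[0] == pair[3]:
--                 new_pair = [pair[0] , pair[1] , pair[3] , pair[2]]
--
--             else:
--                 new_pair = pair
--
--             networks_pairs_final.append(new_pair)
--
--     return networks_pairs_final
-- ===== SOURCE B (Python) =====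
-- # B: index the edges of the complete graph by vertex; for each edge, walk the
-- # later incident edges in ascending position order and emit the common vertex
-- # first in both halves of the quadruple.
-- def generate_contrast_pairs_all(networks):
--     from itertools import combinations
--
--     edges = list(combinations(networks, 2))
--
--     # for each vertex, the positions of the edges it belongs to
--     incident = {v: [] for v in networks}
--     for i, (a, b) in enumerate(edges):
--         incident[a].append(i)
--         incident[b].append(i)
--
--     result = []
--     for i, (a, b) in enumerate(edges):
--         later = sorted({j for j in incident[a] + incident[b] if j > i})
--         for j in later:
--             c, d = edges[j]
--             common = b if b in (c, d) else a
--             first_other = a if common == b else b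
--             second_other = d if common == c else c
--             result.append([common, first_other, common, second_other])
--     return result
-- ===== Notes on version B (the rewrite author's own statement) =====
-- stated objective: faster
-- what changed: Instead of enumerating all pairs of edge-pairs of the complete graph and filtering by value membership (O(n^4) pair-of-pair tests), B builds a per-vertex index of edge positions once and, for each edge, visits only the later incident edges (sorted deduplicated positions), emitting the common-vertex-first quadruple directly.
import Mathlib
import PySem

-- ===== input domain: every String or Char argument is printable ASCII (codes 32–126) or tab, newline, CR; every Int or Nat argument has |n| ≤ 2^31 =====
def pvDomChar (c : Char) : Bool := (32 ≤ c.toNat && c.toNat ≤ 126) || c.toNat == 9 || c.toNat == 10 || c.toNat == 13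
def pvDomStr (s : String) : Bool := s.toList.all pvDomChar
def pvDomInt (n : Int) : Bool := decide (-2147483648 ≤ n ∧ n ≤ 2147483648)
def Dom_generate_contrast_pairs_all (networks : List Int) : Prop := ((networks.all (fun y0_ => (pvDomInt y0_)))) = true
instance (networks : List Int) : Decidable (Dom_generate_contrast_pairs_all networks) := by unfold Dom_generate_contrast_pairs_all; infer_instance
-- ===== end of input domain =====

-- B replaces A's filter over all pairs of edge-pairs by a per-vertex index of edge
-- positions, visiting per edge only the later incident edges (objective: faster).


-- ===== PORT A =====
-- itertools.combinations(l, 2) as pairs, in Python's order (shared by both ports)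
def pvComb2 {α : Type} (l : List α) : List (α × α) :=
  match l with
  | [] => []
  | x :: xs => xs.map (fun y => (x, y)) ++ pvComb2 xs

def generate_contrast_pairs_all (networks : List Int) : List (List Int) :=
  let network_pairs := pvComb2 networks
  let network_pairs_pairs := pvComb2 network_pairs
  network_pairs_pairs.foldl (fun acc np =>
    if (np.1.1 = np.2.1 ∨ np.1.1 = np.2.2) ∨ (np.1.2 = np.2.1 ∨ np.1.2 = np.2.2) then
      let pair : List Int :=
        if np.1.2 = np.2.1 ∨ np.1.2 = np.2.2 then
          [np.1.2, np.1.1, np.2.1, np.2.2]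
        else
          [np.1.1, np.1.2, np.2.1, np.2.2]
      let new_pair : List Int :=
        if pair.getD 0 0 = pair.getD 3 0 then
          [pair.getD 0 0, pair.getD 1 0, pair.getD 3 0, pair.getD 2 0]
        else pair
      acc ++ [new_pair]
    else acc) []

-- ===== PORT B =====
def generate_contrast_pairs_all_alt (networks : List Int) : List (List Int) :=
  let edges := pvComb2 networks
  -- incident = {v: [] for v in networks}; incident[a].append(i); incident[b].append(i)
  let incident0 : PySem.Dict Int (List Int) :=
    networks.foldl (fun d v => d.insert v []) PySem.Dict.empty
  let incident : PySem.Dict Int (List Int) :=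
    (PySem.List.enumerate edges).foldl
      (fun d p => (d.modify p.2.1 [] (· ++ [p.1])).modify p.2.2 [] (· ++ [p.1])) incident0
  (PySem.List.enumerate edges).foldl (fun result p =>
    let i := p.1
    let a := p.2.1
    let b := p.2.2
    -- later = sorted({j for j in incident[a] + incident[b] if j > i})
    let later := PySem.List.sorted
      (PySem.Set.ofList
        (((incident.getD a []) ++ (incident.getD b [])).filter (fun j => decide (i < j))))
      (fun j => j)
    later.foldl (fun acc j =>
      match PySem.List.pyGet? edges j with
      | none => acc   -- unreachable: every j is a valid index into edges
      | some cd =>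
        let common := if b = cd.1 ∨ b = cd.2 then b else a
        let firstOther := if common = b then a else b
        let secondOther := if common = cd.1 then cd.2 else cd.1
        acc ++ [[common, firstOther, common, secondOther]]) result) []

-- ===== PRECONDITION & SPEC =====
def Spec_generate_contrast_pairs_all (networks : List Int) (out : List (List Int)) : Prop := out = generate_contrast_pairs_all_alt networks
instance (networks : List Int) (out : List (List Int)) : Decidable (Spec_generate_contrast_pairs_all networks out) := by unfold Spec_generate_contrast_pairs_all; infer_instance

-- ===== CLAIM (what is proved, stated in full; the proofs are below) =====
def Claim_equal_generate_contrast_pairs_all : Prop := ∀ (networks : List Int), Dom_generate_contrast_pairs_all networks → Spec_generate_contrast_pairs_all networks (generate_contrast_pairs_all networks)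

-- ===== LEMMAS AND PROOFS =====

-- A's loop body as an optional step on one pair of edges
def pvStepA (p q : Int × Int) : Option (List Int) :=
  if (p.1 = q.1 ∨ p.1 = q.2) ∨ (p.2 = q.1 ∨ p.2 = q.2) then
    let pair : List Int :=
      if p.2 = q.1 ∨ p.2 = q.2 then [p.2, p.1, q.1, q.2] else [p.1, p.2, q.1, q.2]
    some (if pair.getD 0 0 = pair.getD 3 0 then
            [pair.getD 0 0, pair.getD 1 0, pair.getD 3 0, pair.getD 2 0]
          else pair)
  else none

-- B's per-edge-pair quadruple
def pvEmit (p q : Int × Int) : List Int :=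
  let common := if p.2 = q.1 ∨ p.2 = q.2 then p.2 else p.1
  let firstOther := if common = p.2 then p.1 else p.2
  let secondOther := if common = q.1 then q.2 else q.1
  [common, firstOther, common, secondOther]

-- "the two edges share a vertex", Bool form
def pvSharesB (p q : Int × Int) : Bool :=
  (decide (p.1 = q.1) || decide (p.1 = q.2)) || (decide (p.2 = q.1) || decide (p.2 = q.2))

-- A's whole pass over a list of edges: each edge against the edges after it
def pvF (ps : List (Int × Int)) : List (List Int) :=
  match ps with
  | [] => []
  | p :: rest => rest.flatMap (fun q => (pvStepA p q).toList) ++ pvF rest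

-- the common middle form: each edge against the later edges sharing a vertex
def pvMid (ps : List (Int × Int)) : List (List Int) :=
  match ps with
  | [] => []
  | p :: rest => ((rest.filter (pvSharesB p)).map (pvEmit p)) ++ pvMid rest

lemma pv_foldl_step (l : List ((Int × Int) × (Int × Int))) (init : List (List Int)) :
    l.foldl (fun acc np =>
      if (np.1.1 = np.2.1 ∨ np.1.1 = np.2.2) ∨ (np.1.2 = np.2.1 ∨ np.1.2 = np.2.2) then
        let pair : List Int :=
          if np.1.2 = np.2.1 ∨ np.1.2 = np.2.2 then
            [np.1.2, np.1.1, np.2.1, np.2.2]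
          else
            [np.1.1, np.1.2, np.2.1, np.2.2]
        let new_pair : List Int :=
          if pair.getD 0 0 = pair.getD 3 0 then
            [pair.getD 0 0, pair.getD 1 0, pair.getD 3 0, pair.getD 2 0]
          else pair
        acc ++ [new_pair]
      else acc) init
    = init ++ l.flatMap (fun np => (pvStepA np.1 np.2).toList) := by
  induction l generalizing init with
  | nil => simp
  | cons np rest ih =>
      simp only [List.foldl_cons, List.flatMap_cons, ih, pvStepA]
      split
      · simp
      · simp

lemma pv_flatMap_comb2 (ps : List (Int × Int)) :
    (pvComb2 ps).flatMap (fun np => (pvStepA np.1 np.2).toList) = pvF ps := by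
  induction ps with
  | nil => simp [pvComb2, pvF]
  | cons p rest ih =>
      simp [pvComb2, pvF, List.flatMap_append, List.flatMap_map, ih]

-- stepA on edges that share no vertex is none
lemma pv_stepA_none {x y a b : Int} (h1 : x ≠ a) (h2 : x ≠ b) (h3 : y ≠ a) (h4 : y ≠ b) :
    pvStepA (x, y) (a, b) = none := by
  simp [pvStepA, h1, h2, h3, h4]

-- stepA on vertex-sharing edges is exactly pvEmit (no side conditions needed)
lemma pv_stepA_some {p q : Int × Int} (hs : pvSharesB p q = true) :
    pvStepA p q = some (pvEmit p q) := by
  obtain ⟨a, b⟩ := p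
  obtain ⟨c, d⟩ := q
  simp only [pvSharesB, Bool.or_eq_true, decide_eq_true_eq] at hs
  by_cases hbc : b = c <;> by_cases hbd : b = d <;>
    by_cases hac : a = c <;> by_cases had : a = d <;>
      simp_all [pvStepA, pvEmit]

lemma pv_flatMap_map {α β : Type} {f : α → List β} {g : α → β} {l : List α}
    (h : ∀ a ∈ l, f a = [g a]) : l.flatMap f = l.map g := by
  induction l with
  | nil => simp
  | cons a l ih =>
      simp [List.flatMap_cons, h a (by simp), ih (fun b hb => h b (by simp [hb]))]

-- per edge, A's option-step pass is the filter-then-emit pass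
lemma pv_flatMap_step_eq_filter_emit (p : Int × Int) (rest : List (Int × Int)) :
    rest.flatMap (fun q => (pvStepA p q).toList)
      = (rest.filter (pvSharesB p)).map (pvEmit p) := by
  induction rest with
  | nil => simp
  | cons q rest ih =>
      by_cases hs : pvSharesB p q = true
      · rw [List.flatMap_cons, pv_stepA_some hs]
        simp only [List.filter_cons, hs, if_pos trivial, List.map_cons, Option.toList_some]
        simpa using ih
      · have hn : pvStepA p q = none := by
          obtain ⟨a, b⟩ := p; obtain ⟨c, d⟩ := q
          simp only [pvSharesB, Bool.or_eq_true, decide_eq_true_eq] at hs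
          push_neg at hs
          exact pv_stepA_none hs.1.1 hs.1.2 hs.2.1 hs.2.2
        rw [List.flatMap_cons, hn]
        simp only [List.filter_cons, hs]
        simpa using ih

-- A equals the middle form
lemma pv_F_eq_mid (l : List (Int × Int)) : pvF l = pvMid l := by
  induction l with
  | nil => rfl
  | cons p rest ih =>
      simp only [pvF, pvMid]
      rw [pv_flatMap_step_eq_filter_emit p rest, ih]

-- generic: a filter-on-snd / map-on-snd pass over any indexed list projects to the plain list
lemma pv_filter_map_snd {α β : Type} (l : List (Int × α)) (Q : α → Bool) (f : α → β) :
    ((l.filter (fun jq => Q jq.2)).map (fun jq => f jq.2))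
      = ((l.map Prod.snd).filter Q).map f := by
  induction l with
  | nil => rfl
  | cons x l ih =>
      by_cases h : Q x.2
      · simp [List.filter_cons, h, ih]
      · simp [List.filter_cons, h, ih]

-- the middle form, re-expressed over the enumerated edge list
lemma pv_mid_eq_enum (l : List (Int × Int)) (s : Int) :
    pvMid l = (PySem.List.enumerate l s).flatMap (fun ip =>
      (((PySem.List.enumerate l s).filter
          (fun jq => decide (ip.1 < jq.1) && pvSharesB ip.2 jq.2)).map
        (fun jq => pvEmit ip.2 jq.2))) := by
  induction l generalizing s with
  | nil => simp [pvMid]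
  | cons p rest ih =>
      rw [PySem.List.enumerate_cons, List.flatMap_cons]
      have hgt : ∀ jq ∈ PySem.List.enumerate rest (s + 1), s < jq.1 := by
        intro jq hjq
        obtain ⟨k, hk, rfl⟩ := (PySem.List.mem_enumerate_iff rest (s + 1) jq).mp hjq
        omega
      have hhead : (((s, p) :: PySem.List.enumerate rest (s + 1)).filter
            (fun jq => decide ((s, p).1 < jq.1) && pvSharesB (s, p).2 jq.2)).map
            (fun jq => pvEmit (s, p).2 jq.2)
          = (rest.filter (pvSharesB p)).map (pvEmit p) := by
        have h1 : (((s, p) :: PySem.List.enumerate rest (s + 1)).filter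
              (fun jq => decide ((s, p).1 < jq.1) && pvSharesB (s, p).2 jq.2))
            = (PySem.List.enumerate rest (s + 1)).filter (fun jq => pvSharesB p jq.2) := by
          rw [List.filter_cons, if_neg (by simp)]
          exact List.filter_congr (fun jq hjq => by simp [hgt jq hjq])
        rw [h1, pv_filter_map_snd (Q := pvSharesB p) (f := pvEmit p)]
        rw [show (PySem.List.enumerate rest (s + 1)).map Prod.snd = rest by
          simpa using PySem.List.map_snd_enumerate rest (s + 1)]
      have htail : (PySem.List.enumerate rest (s + 1)).flatMap (fun ip =>
            (((s, p) :: PySem.List.enumerate rest (s + 1)).filter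
                (fun jq => decide (ip.1 < jq.1) && pvSharesB ip.2 jq.2)).map
              (fun jq => pvEmit ip.2 jq.2))
          = pvMid rest := by
        rw [ih (s + 1)]
        apply List.flatMap_congr
        intro ip hip
        have : ¬ (ip.1 < (s, p).1) := by
          have := hgt ip hip
          simp only
          omega
        rw [List.filter_cons]
        simp [this]
      rw [hhead, htail, pvMid]

-- ========== B-side machinery ==========

-- B's inner loop body at one index
def pvLook (edges : List (Int × Int)) (a b : Int) (j : Int) : List (List Int) :=
  match PySem.List.pyGet? edges j with
  | none => []
  | some cd => [pvEmit (a, b) cd]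

-- the per-vertex index list: positions of the edges containing v (one per endpoint)
def pvIdx (edges : List (Int × Int)) (v : Int) : List Int :=
  (PySem.List.enumerate edges 0).flatMap (fun q =>
    (if q.2.1 = v then [q.1] else []) ++ (if q.2.2 = v then [q.1] else []))

-- B's incident dict (as built by the port)
def pvInc (networks : List Int) : PySem.Dict Int (List Int) :=
  (PySem.List.enumerate (pvComb2 networks) 0).foldl
    (fun d p => (d.modify p.2.1 [] (· ++ [p.1])).modify p.2.2 [] (· ++ [p.1]))
    (networks.foldl (fun d v => d.insert v ([] : List Int)) PySem.Dict.empty)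

-- the {v: [] for v in networks} dict always reads as []
lemma pv_dict0_getD (L : List Int) (d : PySem.Dict Int (List Int))
    (h : ∀ k, d.getD k [] = []) :
    ∀ v, (L.foldl (fun d v => d.insert v ([] : List Int)) d).getD v [] = [] := by
  induction L generalizing d with
  | nil => exact h
  | cons x L ih =>
      intro v
      refine ih _ (fun k => ?_) v
      rw [PySem.Dict.getD_insert]
      split <;> simp [h]

-- the append loop: each vertex's entry collects the positions of its edges, in order
lemma pv_dict_getD (L : List (Int × (Int × Int))) (d : PySem.Dict Int (List Int)) (v : Int) :
    (L.foldl (fun d p => (d.modify p.2.1 [] (· ++ [p.1])).modify p.2.2 [] (· ++ [p.1])) d).getD v []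
      = d.getD v [] ++ L.flatMap (fun q =>
          (if q.2.1 = v then [q.1] else []) ++ (if q.2.2 = v then [q.1] else [])) := by
  induction L generalizing d with
  | nil => simp
  | cons q L ih =>
      rw [List.foldl_cons, ih, List.flatMap_cons]
      by_cases h1 : v = q.2.1 <;> by_cases h2 : v = q.2.2 <;>
        simp_all [PySem.Dict.getD_modify, eq_comm]

-- B's incident dict reads back the per-vertex index lists
lemma pv_incident_getD (networks : List Int) (v : Int) :
    (pvInc networks).getD v [] = pvIdx (pvComb2 networks) v := by
  unfold pvInc
  rw [pv_dict_getD _ _ v, pv_dict0_getD networks _ (fun k => by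
    simp [PySem.Dict.getD_empty])]
  simp [pvIdx]

-- membership in a per-vertex index list
lemma pv_mem_pvIdx {edges : List (Int × Int)} {v j : Int} :
    j ∈ pvIdx edges v ↔ ∃ e, (j, e) ∈ PySem.List.enumerate edges 0 ∧ (e.1 = v ∨ e.2 = v) := by
  unfold pvIdx
  rw [List.mem_flatMap]
  constructor
  · rintro ⟨q, hq, hj⟩
    rcases List.mem_append.mp hj with hj | hj
    · refine ⟨q.2, ?_, ?_⟩
      · split at hj
        · simpa [List.eq_of_mem_singleton hj] using hq
        · simp at hj
      · split at hj
        · simp_all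
        · simp at hj
    · refine ⟨q.2, ?_, ?_⟩
      · split at hj
        · simpa [List.eq_of_mem_singleton hj] using hq
        · simp at hj
      · split at hj
        · simp_all
        · simp at hj
  · rintro ⟨e, he, hv⟩
    refine ⟨(j, e), he, ?_⟩
    rcases hv with hv | hv
    · simp [hv]
    · simp [hv]

-- B's sorted deduplicated merge of the two index lists enumerates the later
-- vertex-sharing edges by position
lemma pv_later_eq (networks : List Int) (i : Int) (p : Int × Int) :
    PySem.List.sorted
        (PySem.Set.ofList
          ((pvIdx (pvComb2 networks) p.1 ++ pvIdx (pvComb2 networks) p.2).filter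
            (fun j => decide (i < j)))) (fun j => j)
      = ((PySem.List.enumerate (pvComb2 networks) 0).filter
          (fun jq => decide (i < jq.1) && pvSharesB p jq.2)).map Prod.fst := by
  apply PySem.List.sorted_eq_of_perm_of_pairwise_lt
  · have hysnd : (((PySem.List.enumerate (pvComb2 networks) 0).filter
          (fun jq => decide (i < jq.1) && pvSharesB p jq.2)).map Prod.fst).Nodup :=
      (List.pairwise_map.mpr
        ((PySem.List.pairwise_lt_enumerate _ 0).filter _)).imp (fun h => ne_of_lt h)
    rw [List.perm_ext_iff_of_nodup hysnd (PySem.Set.nodup_ofList _)]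
    intro j
    rw [PySem.Set.mem_ofList]
    simp only [List.mem_map, List.mem_filter, List.mem_append, pv_mem_pvIdx,
      Bool.and_eq_true, decide_eq_true_eq, pvSharesB, Bool.or_eq_true]
    constructor
    · rintro ⟨⟨j', e⟩, ⟨he, hij, hs⟩, rfl⟩
      refine ⟨?_, by simpa using hij⟩
      rcases hs with (h1 | h1) | (h1 | h1)
      · exact Or.inl ⟨e, he, Or.inl h1.symm⟩
      · exact Or.inl ⟨e, he, Or.inr h1.symm⟩
      · exact Or.inr ⟨e, he, Or.inl h1.symm⟩
      · exact Or.inr ⟨e, he, Or.inr h1.symm⟩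
    · rintro ⟨he, hij⟩
      have hij' : i < j := by simpa using hij
      rcases he with ⟨e, he, hv⟩ | ⟨e, he, hv⟩
      · exact ⟨(j, e), ⟨he, hij', Or.inl (hv.imp Eq.symm Eq.symm)⟩, rfl⟩
      · exact ⟨(j, e), ⟨he, hij', Or.inr (hv.imp Eq.symm Eq.symm)⟩, rfl⟩
  · exact List.pairwise_map.mpr ((PySem.List.pairwise_lt_enumerate _ 0).filter _)

-- looking an enumerated position back up in the edge list
lemma pv_look_at {edges : List (Int × Int)} {j : Int} {e : Int × Int}
    (h : (j, e) ∈ PySem.List.enumerate edges 0) (a b : Int) :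
    pvLook edges a b j = [pvEmit (a, b) e] := by
  obtain ⟨k, hk, hke⟩ := (PySem.List.mem_enumerate_iff edges 0 (j, e)).mp h
  have h1 : j = (0 : Int) + k := (Prod.mk.injEq _ _ _ _).mp hke |>.1
  have e1 : e = edges[k] := (Prod.mk.injEq _ _ _ _).mp hke |>.2
  have hj : j = (k : Int) := by omega
  unfold pvLook
  rw [hj, PySem.List.pyGet?_natCast, List.getElem?_eq_getElem hk, e1]

-- B's inner loop is an append of the looked-up quadruples
lemma pv_inner_foldl (edges : List (Int × Int)) (a b : Int) (later : List Int)
    (res : List (List Int)) :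
    later.foldl (fun acc j =>
      match PySem.List.pyGet? edges j with
      | none => acc
      | some cd =>
        let common := if b = cd.1 ∨ b = cd.2 then b else a
        let firstOther := if common = b then a else b
        let secondOther := if common = cd.1 then cd.2 else cd.1
        acc ++ [[common, firstOther, common, secondOther]]) res
    = res ++ later.flatMap (pvLook edges a b) := by
  induction later generalizing res with
  | nil => simp
  | cons j later ih =>
      rw [List.foldl_cons, ih, List.flatMap_cons]
      cases hg : PySem.List.pyGet? edges j with
      | none => simp [pvLook, hg]
      | some cd => simp [pvLook, pvEmit, hg]

-- B's outer loop as a flatMap of per-edge blocks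
lemma pv_outer (edges : List (Int × Int)) (inc : PySem.Dict Int (List Int)) :
    (PySem.List.enumerate edges 0).foldl (fun result p =>
      (PySem.List.sorted
        (PySem.Set.ofList ((inc.getD p.2.1 [] ++ inc.getD p.2.2 []).filter
          (fun j => decide (p.1 < j)))) (fun j => j)).foldl
        (fun acc j => match PySem.List.pyGet? edges j with
          | none => acc
          | some cd =>
            let common := if p.2.2 = cd.1 ∨ p.2.2 = cd.2 then p.2.2 else p.2.1
            let firstOther := if common = p.2.2 then p.2.1 else p.2.2
            let secondOther := if common = cd.1 then cd.2 else cd.1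
            acc ++ [[common, firstOther, common, secondOther]]) result) []
    = (PySem.List.enumerate edges 0).flatMap (fun p =>
        (PySem.List.sorted
          (PySem.Set.ofList ((inc.getD p.2.1 [] ++ inc.getD p.2.2 []).filter
            (fun j => decide (p.1 < j)))) (fun j => j)).flatMap (pvLook edges p.2.1 p.2.2)) := by
  have h1 := PySem.List.foldl_congr_mem
    (l := PySem.List.enumerate edges 0) (init := ([] : List (List Int)))
    (f := fun result p =>
      (PySem.List.sorted
        (PySem.Set.ofList ((inc.getD p.2.1 [] ++ inc.getD p.2.2 []).filter
          (fun j => decide (p.1 < j)))) (fun j => j)).foldl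
        (fun acc j => match PySem.List.pyGet? edges j with
          | none => acc
          | some cd =>
            let common := if p.2.2 = cd.1 ∨ p.2.2 = cd.2 then p.2.2 else p.2.1
            let firstOther := if common = p.2.2 then p.2.1 else p.2.2
            let secondOther := if common = cd.1 then cd.2 else cd.1
            acc ++ [[common, firstOther, common, secondOther]]) result)
    (g := fun result p => result ++
      (PySem.List.sorted
        (PySem.Set.ofList ((inc.getD p.2.1 [] ++ inc.getD p.2.2 []).filter
          (fun j => decide (p.1 < j)))) (fun j => j)).flatMap (pvLook edges p.2.1 p.2.2))
    (fun acc p _ => pv_inner_foldl edges p.2.1 p.2.2 _ acc)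
  rw [h1, PySem.List.foldl_append_eq_flatMap, List.nil_append]

-- B's whole pass, reduced to the enumerated middle form
lemma pv_alt_eq_enum (networks : List Int) :
    generate_contrast_pairs_all_alt networks
      = (PySem.List.enumerate (pvComb2 networks) 0).flatMap (fun ip =>
          (((PySem.List.enumerate (pvComb2 networks) 0).filter
              (fun jq => decide (ip.1 < jq.1) && pvSharesB ip.2 jq.2)).map
            (fun jq => pvEmit ip.2 jq.2))) := by
  have halt : generate_contrast_pairs_all_alt networks
      = (PySem.List.enumerate (pvComb2 networks) 0).flatMap (fun p =>
          (PySem.List.sorted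
            (PySem.Set.ofList (((pvInc networks).getD p.2.1 [] ++ (pvInc networks).getD p.2.2 []).filter
              (fun j => decide (p.1 < j)))) (fun j => j)).flatMap
            (pvLook (pvComb2 networks) p.2.1 p.2.2)) :=
    pv_outer (pvComb2 networks) (pvInc networks)
  rw [halt]
  apply List.flatMap_congr
  intro p hp
  rw [pv_incident_getD networks p.2.1, pv_incident_getD networks p.2.2]
  rw [pv_later_eq networks p.1 p.2]
  rw [List.flatMap_map]
  apply pv_flatMap_map
  intro jq hjq
  have hje : (jq.1, jq.2) ∈ PySem.List.enumerate (pvComb2 networks) 0 :=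
    (List.mem_filter.mp hjq).1
  exact pv_look_at hje p.2.1 p.2.2

-- ===== VERDICT (by name: the statement is the Claim_ definition above) =====
theorem generate_contrast_pairs_all_spec : Claim_equal_generate_contrast_pairs_all := by
  intro networks _
  show generate_contrast_pairs_all networks = generate_contrast_pairs_all_alt networks
  unfold generate_contrast_pairs_all
  rw [pv_foldl_step, List.nil_append, pv_flatMap_comb2, pv_F_eq_mid,
    pv_mid_eq_enum (pvComb2 networks) 0, pv_alt_eq_enum networks]
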